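-- pv_equiv track=rewrite | github.com/Jazende/AdventOfCode | aoc_17_9.py | garbage_points
-- ===== SOURCE A (Python) =====
-- def garbage_points(text):
--     text = clean_up_escape_chars(text)
--     cur_level = 0
--     cur_points = 0
--     inside_garbage = False
--     garbage_count = 0
--     for char in text:
--         if char == "{" and inside_garbage == False:
--             cur_level += 1
--             cur_points += cur_level
--         if char == "}" and inside_garbage == False:
--             cur_level -= 1
--         if char == "<":
--             inside_garbage = True
--         if char == ">":
--             if inside_garbage:
--                 garbage_count -= 1
--             inside_garbage = False
--         if inside_garbage:
--             garbage_count += 1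
--     return cur_points, garbage_count
--
-- def clean_up_escape_chars(text):
--     while "!" in text:
--         nr = text.index("!")
--         text = text[:nr]+text[nr+2:]
--     return text
-- ===== SOURCE B (Python) =====
-- def garbage_points(text):
--     # One pass: '!' skips the next character in place instead of a re-slicing pre-pass,
--     # fused with the point/garbage counting; like A, the opening '<' of a
--     # garbage section is counted and the closing '>' uncounts it.
--     cur_level = 0
--     cur_points = 0
--     inside_garbage = False
--     garbage_count = 0
--     i = 0
--     n = len(text)
--     while i < n:
--         c = text[i]
--         if c == "!":
--             i += 2
--             continue
--         if inside_garbage: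
--             if c == ">":
--                 inside_garbage = False
--                 garbage_count -= 1
--             else:
--                 garbage_count += 1
--         elif c == "{":
--             cur_level += 1
--             cur_points += cur_level
--         elif c == "}":
--             cur_level -= 1
--         elif c == "<":
--             inside_garbage = True
--             garbage_count += 1
--         i += 1
--     return cur_points, garbage_count
-- ===== Notes on version B (the rewrite author's own statement) =====
-- stated objective: alternative
-- what changed: Replaces the find-and-reslice escape-removal pre-pass followed by a second counting loop with a single index loop that skips the character after each '!' in place while counting points and garbage chars.
import Mathlib
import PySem

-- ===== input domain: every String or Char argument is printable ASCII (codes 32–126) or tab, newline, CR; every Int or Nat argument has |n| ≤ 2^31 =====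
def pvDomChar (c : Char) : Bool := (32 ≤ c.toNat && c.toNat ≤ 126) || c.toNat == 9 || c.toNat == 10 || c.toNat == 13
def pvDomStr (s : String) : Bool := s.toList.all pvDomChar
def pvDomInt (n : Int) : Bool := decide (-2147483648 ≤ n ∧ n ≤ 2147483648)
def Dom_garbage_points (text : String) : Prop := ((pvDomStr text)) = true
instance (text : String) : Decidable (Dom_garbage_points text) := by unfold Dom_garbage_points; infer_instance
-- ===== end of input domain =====

-- B replaces A's find-and-reslice escape-removal pre-pass plus second counting loop by a
-- single fused pass that skips the char after each '!' in place while counting.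

-- ===== PORT A =====
-- clean_up_escape_chars: while "!" in text: nr = text.index("!"); text = text[:nr]+text[nr+2:]
-- (slices with nonnegative bounds are exactly List.take/List.drop).
def pvCleanA (l : List Char) : List Char :=
  if h : '!' ∈ l then
    pvCleanA (l.take (l.idxOf '!') ++ l.drop (l.idxOf '!' + 2))
  else l
termination_by l.length
decreasing_by
  have := List.idxOf_lt_length_of_mem h
  simp [List.length_take, List.length_drop]
  omega

-- the body of A's for-loop, one character step on the state (cur_level, cur_points, inside_garbage, garbage_count)
def pvStepA (st : Int × Int × Bool × Int) (c : Char) : Int × Int × Bool × Int :=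
  let lvl0 := st.1; let pts0 := st.2.1; let ing0 := st.2.2.1; let gc0 := st.2.2.2
  let lvl1 := if c == '{' && ing0 == false then lvl0 + 1 else lvl0
  let pts1 := if c == '{' && ing0 == false then pts0 + lvl1 else pts0
  let lvl2 := if c == '}' && ing0 == false then lvl1 - 1 else lvl1
  let ing1 := if c == '<' then true else ing0
  let gc1 := if c == '>' then (if ing1 then gc0 - 1 else gc0) else gc0
  let ing2 := if c == '>' then false else ing1
  let gc2 := if ing2 then gc1 + 1 else gc1
  (lvl2, pts1, ing2, gc2)

def garbage_points (text : String) : List Int :=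
  let t := pvCleanA text.toList
  let f := t.foldl pvStepA (0, 0, false, 0)
  [f.2.1, f.2.2.2]

-- ===== PORT B =====
-- single pass: '!' skips the next character; branches follow Source B's while-loop
def pvGoB : List Char → Int → Int → Bool → Int → List Int
  | [], _, pts, _, gc => [pts, gc]
  | c :: rest, lvl, pts, ing, gc =>
    if c == '!' then
      match rest with
      | [] => [pts, gc]
      | _ :: t => pvGoB t lvl pts ing gc
    else if ing then
      if c == '>' then pvGoB rest lvl pts false (gc - 1)
      else pvGoB rest lvl pts true (gc + 1)
    else if c == '{' then pvGoB rest (lvl + 1) (pts + (lvl + 1)) ing gc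
    else if c == '}' then pvGoB rest (lvl - 1) pts ing gc
    else if c == '<' then pvGoB rest lvl pts true (gc + 1)
    else pvGoB rest lvl pts ing gc

def garbage_points_alt (text : String) : List Int :=
  pvGoB text.toList 0 0 false 0

-- ===== PRECONDITION & SPEC =====
def Spec_garbage_points (text : String) (out : List Int) : Prop := out = garbage_points_alt text
instance (text : String) (out : List Int) : Decidable (Spec_garbage_points text out) := by unfold Spec_garbage_points; infer_instance

-- ===== CLAIM (what is proved, stated in full; the proofs are below) =====
def Claim_equal_garbage_points : Prop := ∀ (text : String), Dom_garbage_points text → Spec_garbage_points text (garbage_points text)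

-- ===== LEMMAS AND PROOFS =====

-- the escape-stripped text, defined structurally (proof device)
def pvStrip : List Char → List Char
  | [] => []
  | c :: rest =>
    if c == '!' then (match rest with | [] => [] | _ :: t => pvStrip t)
    else c :: pvStrip rest

theorem pvStrip_cons_ne (c : Char) (rest : List Char) (hc : c ≠ '!') :
    pvStrip (c :: rest) = c :: pvStrip rest := by
  rw [pvStrip.eq_def]; simp [hc]

theorem pvCleanA_pos (l : List Char) (h : '!' ∈ l) :
    pvCleanA l = pvCleanA (l.take (l.idxOf '!') ++ l.drop (l.idxOf '!' + 2)) := by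
  rw [pvCleanA, dif_pos h]

theorem pvCleanA_neg (l : List Char) (h : '!' ∉ l) : pvCleanA l = l := by
  rw [pvCleanA, dif_neg h]

theorem pvCleanA_cons_ne : ∀ (n : ℕ) (l : List Char) (c : Char), l.length ≤ n → c ≠ '!' →
    pvCleanA (c :: l) = c :: pvCleanA l := by
  intro n
  induction n with
  | zero =>
    intro l c hl hc
    have hnil : l = [] := List.eq_nil_of_length_eq_zero (Nat.le_zero.mp hl)
    subst hnil
    have h1 : '!' ∉ [c] := by simp only [List.mem_singleton]; exact fun h => hc h.symm
    have h2 : '!' ∉ ([] : List Char) := by simp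
    rw [pvCleanA_neg _ h1, pvCleanA_neg _ h2]
  | succ n ih =>
    intro l c hl hc
    by_cases hm : '!' ∈ l
    · have hnr := List.idxOf_lt_length_of_mem hm
      have hmem : '!' ∈ c :: l := by simp [hm]
      have hidx : (c :: l).idxOf '!' = l.idxOf '!' + 1 := by simp [hc]
      rw [pvCleanA_pos _ hmem, hidx]
      have harg : (c :: l).take (l.idxOf '!' + 1) ++ (c :: l).drop (l.idxOf '!' + 1 + 2)
          = c :: (l.take (l.idxOf '!') ++ l.drop (l.idxOf '!' + 2)) := by
        simp [List.take_succ_cons, List.drop_succ_cons]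
      rw [harg]
      have hlen : (l.take (l.idxOf '!') ++ l.drop (l.idxOf '!' + 2)).length ≤ n := by
        simp [List.length_take, List.length_drop]
        omega
      rw [ih _ c hlen hc, pvCleanA_pos l hm]
    · have hm2 : '!' ∉ c :: l := by
        simp only [List.mem_cons]; push_neg
        exact ⟨fun h => hc h.symm, hm⟩
      rw [pvCleanA_neg _ hm2, pvCleanA_neg _ hm]

theorem pvCleanA_eq_pvStrip : ∀ (n : ℕ) (l : List Char), l.length ≤ n → pvCleanA l = pvStrip l := by
  intro n
  induction n with
  | zero =>
    intro l hl
    have hnil : l = [] := List.eq_nil_of_length_eq_zero (Nat.le_zero.mp hl)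
    subst hnil
    rw [pvCleanA_neg _ (by simp)]; rfl
  | succ n ih =>
    intro l hl
    match l with
    | [] => rw [pvCleanA_neg _ (by simp)]; rfl
    | c :: rest =>
      by_cases hc : c = '!'
      · subst hc
        have hmem : '!' ∈ '!' :: rest := by simp
        have harg : ('!' :: rest).take (('!' :: rest).idxOf '!')
            ++ ('!' :: rest).drop (('!' :: rest).idxOf '!' + 2) = rest.tail := by
          simp
        rw [pvCleanA_pos _ hmem, harg]
        match rest with
        | [] => rw [pvCleanA_neg _ (by simp)]; rfl
        | x :: t =>
          have ht : t.length ≤ n := by simp at hl; omega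
          rw [List.tail_cons, ih t ht]
          conv_rhs => rw [pvStrip.eq_def]
          simp
      · have hr : rest.length ≤ n := by simp at hl; omega
        rw [pvCleanA_cons_ne rest.length rest c (le_refl _) hc, ih rest hr,
          pvStrip_cons_ne c rest hc]

-- B's fused pass equals A's loop folded over the escape-stripped text
theorem pvGoB_eq_foldA : ∀ (n : ℕ) (l : List Char), l.length ≤ n →
    ∀ (lvl pts : Int) (ing : Bool) (gc : Int),
    pvGoB l lvl pts ing gc =
      [(List.foldl pvStepA (lvl, pts, ing, gc) (pvStrip l)).2.1,
       (List.foldl pvStepA (lvl, pts, ing, gc) (pvStrip l)).2.2.2] := by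
  intro n
  induction n with
  | zero =>
    intro l hl
    have hnil : l = [] := List.eq_nil_of_length_eq_zero (Nat.le_zero.mp hl)
    subst hnil; intro lvl pts ing gc; simp [pvGoB, pvStrip]
  | succ n ih =>
    intro l hl lvl pts ing gc
    match l with
    | [] => simp [pvGoB, pvStrip]
    | c :: rest =>
      by_cases hc : c = '!'
      · subst hc
        match rest with
        | [] =>
          rw [pvGoB.eq_def]
          simp [pvStrip]
        | x :: t =>
          have ht : t.length ≤ n := by simp at hl; omega
          rw [pvGoB.eq_def]
          simp only [pvStrip, beq_self_eq_true, if_true]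
          simpa using ih t ht lvl pts ing gc
      · have hr : rest.length ≤ n := by simp at hl; omega
        rw [pvStrip_cons_ne c rest hc]
        simp only [List.foldl_cons]
        by_cases hing : ing = true
        · subst hing
          by_cases h1 : c = '>'
          · subst h1
            rw [show pvGoB ('>' :: rest) lvl pts true gc = pvGoB rest lvl pts false (gc - 1) by
                rw [pvGoB.eq_def]; simp]
            rw [ih rest hr]
            congr 2 <;> simp [pvStepA]
          · rw [show pvGoB (c :: rest) lvl pts true gc = pvGoB rest lvl pts true (gc + 1) by
                rw [pvGoB.eq_def]; simp [hc, h1]]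
            rw [ih rest hr]
            congr 2 <;> simp [pvStepA, h1] <;> by_cases h2 : c = '<' <;> simp [h2]
        · have hing' : ing = false := by cases ing <;> simp_all
          subst hing'
          by_cases h1 : c = '{'
          · subst h1
            rw [show pvGoB ('{' :: rest) lvl pts false gc
                = pvGoB rest (lvl + 1) (pts + (lvl + 1)) false gc by rw [pvGoB.eq_def]; simp]
            rw [ih rest hr]
            congr 2 <;> simp [pvStepA]
          · by_cases h2 : c = '}'
            · subst h2
              rw [show pvGoB ('}' :: rest) lvl pts false gc
                  = pvGoB rest (lvl - 1) pts false gc by rw [pvGoB.eq_def]; simp]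
              rw [ih rest hr]
              congr 2 <;> simp [pvStepA]
            · by_cases h3 : c = '<'
              · subst h3
                rw [show pvGoB ('<' :: rest) lvl pts false gc
                    = pvGoB rest lvl pts true (gc + 1) by rw [pvGoB.eq_def]; simp]
                rw [ih rest hr]
                congr 2 <;> simp [pvStepA]
              · by_cases h4 : c = '>'
                · subst h4
                  rw [show pvGoB ('>' :: rest) lvl pts false gc
                      = pvGoB rest lvl pts false gc by rw [pvGoB.eq_def]; simp]
                  rw [ih rest hr]
                  congr 2 <;> simp [pvStepA]
                · rw [show pvGoB (c :: rest) lvl pts false gc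
                      = pvGoB rest lvl pts false gc by rw [pvGoB.eq_def]; simp [hc, h1, h2, h3]]
                  rw [ih rest hr]
                  congr 2 <;> simp [pvStepA, hc, h1, h2, h3, h4]

-- ===== VERDICT (by name: the statement is the Claim_ definition above) =====
theorem garbage_points_spec : Claim_equal_garbage_points := by
  intro text _
  unfold Spec_garbage_points garbage_points garbage_points_alt
  rw [pvCleanA_eq_pvStrip text.toList.length text.toList (le_refl _),
      pvGoB_eq_foldA text.toList.length text.toList (le_refl _)]
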